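-- pv_equiv track=rewrite | github.com/marco-willi/camera-trap-classifier | data/importer.py | _is_images_ok
-- ===== SOURCE A (Python) =====
-- def _is_images_ok(images_list):
--     """ Check Images List
--
--         Expected Format:
--         ----------------
--         "images": ["\\images\\4715\\all\\cat\\10296725_0.jpeg",
--                    "\\images\\4715\\all\\cat\\10296726_0.jpeg",
--                    "\\images\\4715\\all\\cat\\10296727_0.jpeg"
--                   ]
--     """
--
--     if not isinstance(images_list, list):
--         return False
--
--     # Check that images entry is a list of strings
--     if isinstance(images_list, list):
--         if not all(isinstance(x, str) for x in images_list):
--             return False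
--
--     # Check if at least one entry contains a path
--     if all(x == "" for x in images_list):
--         return False
--
--     # Check if at least one image remains
--     if len(images_list) == 0:
--         return False
--
--     return True
-- ===== SOURCE B (Python) =====
-- def _is_images_ok(images_list):
--     if not isinstance(images_list, list):
--         return False
--     has_nonempty = False
--     for x in images_list:
--         if not isinstance(x, str):
--             return False
--         if x != "":
--             has_nonempty = True
--     return has_nonempty
-- ===== Notes on version B (the rewrite author's own statement) =====
-- stated objective: simpler
-- what changed: Three separate full scans (all-strings, all-empty, length check) are replaced by a single loop maintaining one has_nonempty flag, which is also False for the empty list.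
import Mathlib
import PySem

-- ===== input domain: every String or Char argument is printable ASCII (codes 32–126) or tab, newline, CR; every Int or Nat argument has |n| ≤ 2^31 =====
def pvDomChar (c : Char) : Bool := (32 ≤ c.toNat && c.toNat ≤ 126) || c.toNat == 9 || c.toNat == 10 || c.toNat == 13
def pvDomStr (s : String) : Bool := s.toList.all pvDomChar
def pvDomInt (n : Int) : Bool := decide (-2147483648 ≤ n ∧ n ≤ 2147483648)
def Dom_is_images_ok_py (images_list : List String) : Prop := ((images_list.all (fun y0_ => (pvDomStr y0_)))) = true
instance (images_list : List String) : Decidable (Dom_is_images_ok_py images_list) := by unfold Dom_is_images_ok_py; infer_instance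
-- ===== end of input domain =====

-- B replaces A's three separate scans (all-strings, all-empty, length) by a single pass
-- maintaining one has_nonempty flag; objective: simpler.


-- ===== PORT A =====
-- In Lean the argument is typed List String, so the isinstance guards are True;
-- the remaining checks are ported literally in order.
def is_images_ok_py (images_list : List String) : Bool :=
  if ¬ (images_list.all (fun x => x == "")) = false ∧ (images_list.all (fun x => x == "")) = true then
    false
  else if images_list.all (fun x => x == "") then
    false
  else if images_list.length = 0 then
    false
  else
    true

-- ===== PORT B =====
-- the single loop of Source B: carries has_nonempty; the isinstance-str early return never fires for List String
def is_images_ok_py_altLoop : List String → Bool → Bool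
  | [], has_nonempty => has_nonempty
  | x :: xs, has_nonempty => is_images_ok_py_altLoop xs (if x != "" then true else has_nonempty)

def is_images_ok_py_alt (images_list : List String) : Bool :=
  is_images_ok_py_altLoop images_list false

-- ===== PRECONDITION & SPEC =====
def Spec_is_images_ok_py (images_list : List String) (out : Bool) : Prop := out = is_images_ok_py_alt images_list
instance (images_list : List String) (out : Bool) : Decidable (Spec_is_images_ok_py images_list out) := by unfold Spec_is_images_ok_py; infer_instance

-- ===== CLAIM (what is proved, stated in full; the proofs are below) =====
def Claim_equal_is_images_ok_py : Prop := ∀ (images_list : List String), Dom_is_images_ok_py images_list → Spec_is_images_ok_py images_list (is_images_ok_py images_list)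

-- ===== LEMMAS AND PROOFS =====
theorem altLoop_eq (l : List String) (h : Bool) :
    is_images_ok_py_altLoop l h = (h || l.any (fun x => x != "")) := by
  induction l generalizing h with
  | nil => simp [is_images_ok_py_altLoop]
  | cons x xs ih =>
    simp only [is_images_ok_py_altLoop, List.any_cons, ih]
    by_cases hx : x = "" <;> simp [hx]

theorem ports_eq (l : List String) : is_images_ok_py l = is_images_ok_py_alt l := by
  unfold is_images_ok_py is_images_ok_py_alt
  rw [altLoop_eq]
  rcases hall : l.all (fun x => x == "") with _ | _
  · have : l ≠ [] := by rintro rfl; simp at hall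
    simp only [List.all_eq_not_any_not] at hall
    simp_all
  · simp_all [List.all_eq_not_any_not]
    exact hall

-- ===== VERDICT (by name: the statement is the Claim_ definition above) =====
theorem is_images_ok_py_spec : Claim_equal_is_images_ok_py := by
  intro l _
  unfold Spec_is_images_ok_py
  exact ports_eq l
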